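-- pv_equiv track=rewrite | github.com/omnirevolve/omnirevolve-image-processor | image_processor/08_dedup_layer_basic.py | _cluster_by_overlap
-- ===== SOURCE A (Python) =====
-- from typing import List, Tuple, Dict
--
-- def _bbox_overlap(b1: Tuple[int,int,int,int], b2: Tuple[int,int,int,int]) -> bool:
--     return not (b1[2] < b2[0] or b2[2] < b1[0] or b1[3] < b2[1] or b2[3] < b1[1])
--
-- def _cluster_by_overlap(bboxes: List[Tuple[int,int,int,int]]) -> List[List[int]]:
--     """Naive O(n^2) is fine for ~1–2k lines and keeps code simple."""
--     n=len(bboxes)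
--     if n==0: return []
--     parent=list(range(n))
--     def find(x):
--         while parent[x]!=x:
--             parent[x]=parent[parent[x]]; x=parent[x]
--         return x
--     def unite(a,b):
--         ra,rb=find(a),find(b)
--         if ra!=rb: parent[rb]=ra
--     for i in range(n):
--         bi=bboxes[i]
--         for j in range(i+1,n):
--             if _bbox_overlap(bi,bboxes[j]): unite(i,j)
--     groups: Dict[int,List[int]]={}
--     for i in range(n):
--         r=find(i); groups.setdefault(r,[]).append(i)
--     return list(groups.values())
-- ===== SOURCE B (Python) =====
-- from typing import List, Tuple
--
-- def _bbox_overlap(b1: Tuple[int,int,int,int], b2: Tuple[int,int,int,int]) -> bool: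
--     return not (b1[2] < b2[0] or b2[2] < b1[0] or b1[3] < b2[1] or b2[3] < b1[1])
--
-- def _cluster_by_overlap(bboxes: List[Tuple[int,int,int,int]]) -> List[List[int]]:
--     """Keeps the component lists themselves (sorted, ordered by smallest member)
--     and merges the two lists of each overlapping pair; no parent pointers, no
--     find/union, no final grouping pass."""
--     n = len(bboxes)
--     clusters = [[i] for i in range(n)]
--     for i in range(n):
--         bi = bboxes[i]
--         for j in range(i + 1, n):
--             if _bbox_overlap(bi, bboxes[j]):
--                 ci = next(c for c in clusters if i in c)
--                 cj = next(c for c in clusters if j in c)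
--                 if ci != cj:
--                     merged = sorted(ci + cj)
--                     clusters = [c for c in clusters if c != ci and c != cj]
--                     clusters.append(merged)
--                     clusters.sort(key=lambda c: c[0])
--     return clusters
-- ===== Notes on version B (the rewrite author's own statement) =====
-- stated objective: alternative
-- what changed: replaces the path-halving union-find plus a dict grouping pass by direct maintenance of the component lists themselves (sorted, ordered by smallest member), merging the two lists of each overlapping pair; no parent pointers, no find/unite, no second grouping pass
import Mathlib
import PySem

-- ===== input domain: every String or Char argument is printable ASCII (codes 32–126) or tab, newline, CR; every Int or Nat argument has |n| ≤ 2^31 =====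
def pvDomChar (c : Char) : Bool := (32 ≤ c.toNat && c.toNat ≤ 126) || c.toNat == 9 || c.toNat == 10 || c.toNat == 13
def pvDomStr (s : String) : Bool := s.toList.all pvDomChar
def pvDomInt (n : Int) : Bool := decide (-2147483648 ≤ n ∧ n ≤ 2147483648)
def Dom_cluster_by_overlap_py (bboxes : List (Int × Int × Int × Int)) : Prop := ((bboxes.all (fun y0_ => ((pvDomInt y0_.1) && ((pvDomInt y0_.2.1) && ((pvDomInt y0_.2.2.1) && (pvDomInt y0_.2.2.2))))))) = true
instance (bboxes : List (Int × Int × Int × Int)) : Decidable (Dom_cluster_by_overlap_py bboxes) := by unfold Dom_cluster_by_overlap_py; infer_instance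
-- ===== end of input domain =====

-- B replaces the union-find + dict grouping pass of A by direct maintenance of the sorted
-- component lists, merging the two lists of each overlapping pair (objective: alternative).

-- ===== PORT A =====
-- _bbox_overlap(b1, b2)  (shared module helper, used verbatim by both A and B)
def overlapB (b1 b2 : Int × Int × Int × Int) : Bool :=
  !(decide (b1.2.2.1 < b2.1) || decide (b2.2.2.1 < b1.1) ||
    decide (b1.2.2.2 < b2.2.1) || decide (b2.2.2.2 < b1.2.1))

-- bboxes[i] (index always in range in both programs)
def nthBox (bboxes : List (Int × Int × Int × Int)) (i : Nat) : Int × Int × Int × Int :=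
  bboxes.getD i (0, 0, 0, 0)

-- find(x): 'while parent[x]!=x: parent[x]=parent[parent[x]]; x=parent[x]' — ported with
-- fuel n; the proof below (pvFind_spec) shows fuel n is never exhausted on reachable states,
-- so this is exactly Python's unbounded while loop.
def pfind : Nat → List Nat → Nat → List Nat × Nat
  | 0, p, x => (p, x)
  | fuel + 1, p, x =>
    if p.getD x 0 = x then (p, x)
    else
      let px2 := p.getD (p.getD x 0) 0
      pfind fuel (p.set x px2) px2

-- unite(a,b): 'ra,rb=find(a),find(b); if ra!=rb: parent[rb]=ra'
def unite (n : Nat) (p : List Nat) (a b : Nat) : List Nat :=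
  let r1 := pfind n p a
  let r2 := pfind n r1.1 b
  if r1.2 ≠ r2.2 then r2.1.set r2.2 r1.2 else r2.1

-- groups.setdefault(r,[]).append(i) on the dict as an insertion-ordered association list
-- (exact: first matching key gets the append, otherwise the new entry goes at the end)
def sdapp (gs : List (Nat × List Nat)) (r i : Nat) : List (Nat × List Nat) :=
  match gs with
  | [] => [(r, [i])]
  | (k, v) :: t => if k = r then (k, v ++ [i]) :: t else (k, v) :: sdapp t r i

def cluster_by_overlap_py (bboxes : List (Int × Int × Int × Int)) : List (List Int) :=
  let n := bboxes.length
  if n = 0 then []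
  else
    let parent0 := List.range n
    let parent1 := (List.range n).foldl (fun par i =>
      let bi := nthBox bboxes i
      (List.range' (i + 1) (n - (i + 1))).foldl (fun par j =>
        if overlapB bi (nthBox bboxes j) then unite n par i j else par) par) parent0
    let res := (List.range n).foldl
      (fun (st : List (Nat × List Nat) × List Nat) i =>
        let fr := pfind n st.2 i
        (sdapp st.1 fr.2 i, fr.1)) ([], parent1)
    res.1.map (fun kv => kv.2.map (fun x => (x : Int)))

-- ===== PORT B =====
def cluster_by_overlap_py_alt (bboxes : List (Int × Int × Int × Int)) : List (List Int) :=
  let n := bboxes.length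
  let clusters0 := (List.range n).map (fun i => [i])
  let clusters := (List.range n).foldl (fun cs i =>
    let bi := nthBox bboxes i
    (List.range' (i + 1) (n - (i + 1))).foldl (fun cs j =>
      if overlapB bi (nthBox bboxes j) then
        -- ci/cj = next(c for c in clusters if i in c) — never fails (clusters partition range n)
        match cs.find? (fun c => c.contains i), cs.find? (fun c => c.contains j) with
        | some ci, some cj =>
          if ci ≠ cj then
            -- merged = sorted(ci+cj); remove ci,cj; append; clusters.sort(key=lambda c: c[0])
            -- (key c[0] ported as headD 0: every cluster is nonempty)
            PySem.List.sorted
              ((cs.filter (fun c => c ≠ ci && c ≠ cj)) ++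
                [PySem.List.sorted (ci ++ cj) (fun x => x) false])
              (fun c => c.headD 0) false
          else cs
        | _, _ => cs
      else cs) cs) clusters0
  clusters.map (fun c => c.map (fun x => (x : Int)))

-- ===== PRECONDITION & SPEC =====
def Spec_cluster_by_overlap_py (bboxes : List (Int × Int × Int × Int)) (out : List (List Int)) : Prop := out = cluster_by_overlap_py_alt bboxes
instance (bboxes : List (Int × Int × Int × Int)) (out : List (List Int)) : Decidable (Spec_cluster_by_overlap_py bboxes out) := by unfold Spec_cluster_by_overlap_py; infer_instance

-- ===== CLAIM (what is proved, stated in full; the proofs are below) =====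
def Claim_equal_cluster_by_overlap_py : Prop := ∀ (bboxes : List (Int × Int × Int × Int)), Dom_cluster_by_overlap_py bboxes → Spec_cluster_by_overlap_py bboxes (cluster_by_overlap_py bboxes)

-- ===== LEMMAS AND PROOFS =====

-- ---- the parent array as a functional graph ----

def pvStep (p : List Nat) (x : Nat) : Nat := p.getD x 0

def pvRoot (n : Nat) (p : List Nat) (x : Nat) : Nat := (pvStep p)^[n] x

-- well-formed union-find state: length n, entries below n, every path absorbed within n steps
def pvUF (n : Nat) (p : List Nat) : Prop :=
  p.length = n ∧ (∀ x, x < n → pvStep p x < n) ∧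
  (∀ x, x < n → pvStep p (pvRoot n p x) = pvRoot n p x)

theorem pvStep_set {p : List Nat} {x : Nat} (w : Nat) (hx : x < p.length) (y : Nat) :
    pvStep (p.set x w) y = if y = x then w else pvStep p y := by
  unfold pvStep List.getD
  by_cases hyx : y = x
  · subst hyx; rw [List.getElem?_set_self hx]; simp
  · rw [List.getElem?_set_ne (by omega : x ≠ y)]; simp [hyx]

theorem pvIter_lt {n : Nat} {p : List Nat} (h : pvUF n p) {x : Nat} (hx : x < n) (k : Nat) :
    (pvStep p)^[k] x < n := by
  induction k generalizing x with
  | zero => simpa using hx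
  | succ k ih =>
    rw [Function.iterate_succ_apply]
    exact ih (h.2.1 x hx)

-- once a fixpoint is reached it is kept
theorem pvFix_mono {f : Nat → Nat} {x r : Nat} {a : Nat} (ha : f^[a] x = r) (hr : f r = r) :
    ∀ m, a ≤ m → f^[m] x = r := by
  intro m hm
  induction m with
  | zero => simpa [Nat.le_zero.mp hm] using ha
  | succ m ih =>
    rcases Nat.lt_or_ge a (m+1) with hlt | hge
    · rw [Function.iterate_succ_apply', ih (by omega), hr]
    · have : a = m + 1 := by omega
      subst this; exact ha

theorem pvAbsorb {n : Nat} {p : List Nat} (h : pvUF n p) {x : Nat} (hx : x < n) :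
    ∀ m, n ≤ m → (pvStep p)^[m] x = pvRoot n p x := by
  exact pvFix_mono rfl (h.2.2 x hx)

theorem pvRoot_fix_self {n : Nat} {p : List Nat} {x : Nat} (hfix : pvStep p x = x) :
    pvRoot n p x = x := by
  exact Function.iterate_fixed hfix n

theorem pvRoot_step {n : Nat} {p : List Nat} (h : pvUF n p) {x : Nat} (hx : x < n) :
    pvRoot n p (pvStep p x) = pvRoot n p x := by
  have h1 : (pvStep p)^[n+1] x = pvRoot n p x := pvAbsorb h hx (n+1) (by omega)
  calc pvRoot n p (pvStep p x) = (pvStep p)^[n+1] x := (Function.iterate_succ_apply (pvStep p) n x).symm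
    _ = pvRoot n p x := h1

-- a non-root is never revisited by its own path
theorem pvNoRev {n : Nat} {p : List Nat} (h : pvUF n p) {x : Nat} (hx : x < n)
    (hne : pvStep p x ≠ x) : ∀ k, 1 ≤ k → (pvStep p)^[k] x ≠ x := by
  intro k hk heq
  have hper : ∀ t, (pvStep p)^[t*k] x = x := by
    intro t
    induction t with
    | zero => simp
    | succ t ih =>
      have : (t+1)*k = k + t*k := by ring
      rw [this, Function.iterate_add_apply, ih, heq]
  have habs := pvAbsorb h hx (n*k) (Nat.le_mul_of_pos_right n (by omega))
  have hroot : pvRoot n p x = x := by rw [← habs, hper n]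
  have := h.2.2 x hx
  rw [hroot] at this
  exact hne this

-- path compression: pointing x at any vertex of its own path keeps every root
theorem pvShortcut {n : Nat} {p : List Nat} (h : pvUF n p) {x m : Nat} (hx : x < n)
    (hm : 1 ≤ m) :
    pvUF n (p.set x ((pvStep p)^[m] x)) ∧
    ∀ y, y < n → pvRoot n (p.set x ((pvStep p)^[m] x)) y = pvRoot n p y := by
  set w := (pvStep p)^[m] x with hw
  set p' := p.set x w with hp'
  have hxlen : x < p.length := by rw [h.1]; exact hx
  have hstep' : ∀ y, pvStep p' y = if y = x then w else pvStep p y := pvStep_set w hxlen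
  have hspeed : ∀ (k : Nat) (y : Nat), ∃ g, k ≤ g ∧ (pvStep p')^[k] y = (pvStep p)^[g] y := by
    intro k y
    induction k with
    | zero => exact ⟨0, le_rfl, rfl⟩
    | succ k ih =>
      obtain ⟨g, hg, he⟩ := ih
      rw [Function.iterate_succ_apply', he, hstep']
      by_cases hcase : (pvStep p)^[g] y = x
      · refine ⟨m + g, by omega, ?_⟩
        rw [hw, Function.iterate_add_apply, hcase]
        simp
      · refine ⟨g + 1, by omega, ?_⟩
        simp only [if_neg hcase]
        exact (Function.iterate_succ_apply' _ _ _).symm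
  have hroots : ∀ y, y < n → pvRoot n p' y = pvRoot n p y := by
    intro y hy
    obtain ⟨g, hg, he⟩ := hspeed n y
    unfold pvRoot
    rw [he]
    exact pvAbsorb h hy g hg
  refine ⟨⟨?_, ?_, ?_⟩, hroots⟩
  · rw [List.length_set, h.1]
  · intro y hy
    rw [hstep']
    by_cases hcase : y = x
    · rw [if_pos hcase, hw]; exact pvIter_lt h hx m
    · rw [if_neg hcase]; exact h.2.1 y hy
  · intro y hy
    rw [hroots y hy]
    set r := pvRoot n p y with hr
    have hrfix : pvStep p r = r := h.2.2 y hy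
    rw [hstep']
    by_cases hcase : r = x
    · rw [if_pos hcase, hw, ← hcase]
      exact Function.iterate_fixed hrfix m
    · rw [if_neg hcase]; exact hrfix

-- linking root rb under root ra
theorem pvUnion {n : Nat} {p : List Nat} (h : pvUF n p) {ra rb : Nat} (hra : ra < n)
    (hrb : rb < n) (hfa : pvStep p ra = ra) (hfb : pvStep p rb = rb) (hne : ra ≠ rb) :
    pvUF n (p.set rb ra) ∧
    ∀ y, y < n → pvRoot n (p.set rb ra) y =
      if pvRoot n p y = rb then ra else pvRoot n p y := by
  set p' := p.set rb ra with hp'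
  have hrblen : rb < p.length := by rw [h.1]; exact hrb
  have hstep' : ∀ y, pvStep p' y = if y = rb then ra else pvStep p y := pvStep_set ra hrblen
  -- case analysis on whether y's path reaches rb
  have hmain : ∀ y, y < n →
      ((pvRoot n p y ≠ rb → pvRoot n p' y = pvRoot n p y) ∧
       (pvRoot n p y = rb → pvRoot n p' y = ra)) := by
    intro y hy
    constructor
    · intro hyr
      have hpathne : ∀ k, (pvStep p)^[k] y ≠ rb := by
        intro k hk
        have habs := pvFix_mono hk hfb (max k n) (le_max_left _ _)
        rw [pvAbsorb h hy (max k n) (le_max_right _ _)] at habs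
        exact hyr habs
      have hagree : ∀ k, (pvStep p')^[k] y = (pvStep p)^[k] y := by
        intro k
        induction k with
        | zero => rfl
        | succ k ih =>
          rw [Function.iterate_succ_apply', ih, hstep', if_neg (hpathne k)]
          exact (Function.iterate_succ_apply' _ _ _).symm
      unfold pvRoot
      rw [hagree n]
    · intro hyr
      -- find the first hit of rb, below n
      have hex : ∃ k, (pvStep p)^[k] y = rb := ⟨n, hyr⟩
      have hexlt : ∃ k, k < n ∧ (pvStep p)^[k] y = rb := by
        by_cases hyrb : y = rb
        · exact ⟨0, by omega, hyrb⟩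
        · obtain ⟨a, b, hab, heq⟩ :
              ∃ a b : Fin (n+1), a ≠ b ∧
                (pvStep p)^[(a : Nat)] y = (pvStep p)^[(b : Nat)] y := by
            have hcard : Fintype.card (Fin n) < Fintype.card (Fin (n+1)) := by simp
            obtain ⟨a, b, hab, heq⟩ := Fintype.exists_ne_map_eq_of_card_lt
              (fun t : Fin (n+1) => (⟨(pvStep p)^[(t : Nat)] y, pvIter_lt h hy _⟩ : Fin n)) hcard
            exact ⟨a, b, hab, by simpa using congrArg Fin.val heq⟩
          -- order them
          rcases Nat.lt_or_ge (a : Nat) (b : Nat) with hlt | hge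
          · have hper : ∀ t, (pvStep p)^[(a : Nat) + t*((b : Nat)-(a : Nat))] y
                = (pvStep p)^[(a : Nat)] y := by
              intro t
              induction t with
              | zero => simp
              | succ t ih =>
                have hsplit : (a : Nat) + (t+1)*((b : Nat)-(a : Nat))
                    = ((b : Nat)-(a : Nat)) + ((a : Nat) + t*((b : Nat)-(a : Nat))) := by ring
                rw [hsplit, Function.iterate_add_apply, ih, ← Function.iterate_add_apply]
                have : (b : Nat) - (a : Nat) + (a : Nat) = (b : Nat) := by omega
                rw [this, ← heq]
            have hbig : n ≤ (a : Nat) + n*((b : Nat)-(a : Nat)) := by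
              have : 1 ≤ (b : Nat) - (a : Nat) := by omega
              calc n ≤ n * ((b : Nat)-(a : Nat)) := Nat.le_mul_of_pos_right n (by omega)
                _ ≤ (a : Nat) + n*((b : Nat)-(a : Nat)) := by omega
            have := hper n
            rw [pvAbsorb h hy _ hbig, hyr] at this
            exact ⟨(a : Nat), by have := b.isLt; omega, this.symm⟩
          · have hlt' : (b : Nat) < (a : Nat) := by
              rcases Nat.lt_or_ge (b : Nat) (a : Nat) with h' | h'
              · exact h'
              · exact absurd (Fin.ext (by omega)) hab
            have hper : ∀ t, (pvStep p)^[(b : Nat) + t*((a : Nat)-(b : Nat))] y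
                = (pvStep p)^[(b : Nat)] y := by
              intro t
              induction t with
              | zero => simp
              | succ t ih =>
                have hsplit : (b : Nat) + (t+1)*((a : Nat)-(b : Nat))
                    = ((a : Nat)-(b : Nat)) + ((b : Nat) + t*((a : Nat)-(b : Nat))) := by ring
                rw [hsplit, Function.iterate_add_apply, ih, ← Function.iterate_add_apply]
                have : (a : Nat) - (b : Nat) + (b : Nat) = (a : Nat) := by omega
                rw [this, heq]
            have hbig : n ≤ (b : Nat) + n*((a : Nat)-(b : Nat)) := by
              have : 1 ≤ (a : Nat) - (b : Nat) := by omega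
              calc n ≤ n * ((a : Nat)-(b : Nat)) := Nat.le_mul_of_pos_right n (by omega)
                _ ≤ (b : Nat) + n*((a : Nat)-(b : Nat)) := by omega
            have := hper n
            rw [pvAbsorb h hy _ hbig, hyr] at this
            exact ⟨(b : Nat), by have := a.isLt; omega, this.symm⟩
      classical
      obtain ⟨kb, hkbn, hkb⟩ := hexlt
      set k0 := Nat.find hex with hk0def
      have hk0 : (pvStep p)^[k0] y = rb := Nat.find_spec hex
      have hk0n : k0 < n := lt_of_le_of_lt (Nat.find_le hkb) hkbn
      have hagree : ∀ k, k ≤ k0 → (pvStep p')^[k] y = (pvStep p)^[k] y := by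
        intro k hk
        induction k with
        | zero => rfl
        | succ k ih =>
          rw [Function.iterate_succ_apply', ih (by omega), hstep',
            if_neg (Nat.find_min hex (by omega : k < k0))]
          exact (Function.iterate_succ_apply' _ _ _).symm
      have hstepk : (pvStep p')^[k0+1] y = ra := by
        rw [Function.iterate_succ_apply', hagree k0 le_rfl, hk0, hstep', if_pos rfl]
      have hrafix' : pvStep p' ra = ra := by rw [hstep', if_neg hne, hfa]
      unfold pvRoot
      exact pvFix_mono hstepk hrafix' n (by omega)
  have hroots : ∀ y, y < n → pvRoot n p' y =
      if pvRoot n p y = rb then ra else pvRoot n p y := by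
    intro y hy
    by_cases hcase : pvRoot n p y = rb
    · rw [if_pos hcase]; exact (hmain y hy).2 hcase
    · rw [if_neg hcase]; exact (hmain y hy).1 hcase
  refine ⟨⟨?_, ?_, ?_⟩, hroots⟩
  · rw [List.length_set, h.1]
  · intro y hy
    rw [hstep']
    by_cases hcase : y = rb
    · rw [if_pos hcase]; exact hra
    · rw [if_neg hcase]; exact h.2.1 y hy
  · intro y hy
    rw [hroots y hy]
    by_cases hcase : pvRoot n p y = rb
    · rw [if_pos hcase, hstep', if_neg hne, hfa]
    · rw [if_neg hcase, hstep', if_neg hcase]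
      exact h.2.2 y hy

-- the ported find returns the root and preserves every root
theorem pvFind_spec {n : Nat} : ∀ (fuel : Nat) (p : List Nat) (x : Nat), pvUF n p → x < n →
    (pvStep p)^[fuel] x = pvRoot n p x →
    (pfind fuel p x).2 = pvRoot n p x ∧ pvUF n (pfind fuel p x).1 ∧
    ∀ y, y < n → pvRoot n (pfind fuel p x).1 y = pvRoot n p y := by
  intro fuel
  induction fuel with
  | zero =>
    intro p x h hx habs
    exact ⟨habs, h, fun y _ => rfl⟩
  | succ fuel ih =>
    intro p x h hx habs
    by_cases hfix : p.getD x 0 = x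
    · have hgoal : pfind (fuel+1) p x = (p, x) := by
        show (if p.getD x 0 = x then (p, x) else _) = (p, x)
        rw [if_pos hfix]
      rw [hgoal]
      exact ⟨(pvRoot_fix_self (n := n) hfix).symm, h, fun y _ => rfl⟩
    · have hfix' : pvStep p x ≠ x := hfix
      have hgoal : pfind (fuel+1) p x
          = pfind fuel (p.set x (pvStep p (pvStep p x))) (pvStep p (pvStep p x)) := by
        simp only [pfind, if_neg hfix]; rfl
      set px2 := pvStep p (pvStep p x) with hpx2def
      have hpx2two : px2 = (pvStep p)^[2] x := rfl
      obtain ⟨hUF', hroots'⟩ := pvShortcut h hx (m := 2) (by omega)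
      have hseteq : p.set x ((pvStep p)^[2] x) = p.set x px2 := by rw [← hpx2two]
      rw [hseteq] at hUF' hroots'
      set p' := p.set x px2 with hp'def
      have hxlen : x < p.length := by rw [h.1]; exact hx
      have hstep' : ∀ y, pvStep p' y = if y = x then px2 else pvStep p y := pvStep_set px2 hxlen
      have hpx2lt : px2 < n := h.2.1 _ (h.2.1 _ hx)
      have hner : ∀ k, (pvStep p)^[k] px2 ≠ x := by
        intro k
        have he : (pvStep p)^[k] px2 = (pvStep p)^[k+2] x := by
          rw [Function.iterate_add_apply, ← hpx2two]
        rw [he]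
        exact pvNoRev h hx hfix' (k+2) (by omega)
      have hagree : ∀ k, (pvStep p')^[k] px2 = (pvStep p)^[k] px2 := by
        intro k
        induction k with
        | zero => rfl
        | succ k ihk =>
          rw [Function.iterate_succ_apply', ihk, hstep', if_neg (hner k)]
          exact (Function.iterate_succ_apply' _ _ _).symm
      have hrootpx2 : pvRoot n p px2 = pvRoot n p x := by
        rw [hpx2def, pvRoot_step h (h.2.1 x hx), pvRoot_step h hx]
      have habs' : (pvStep p')^[fuel] px2 = pvRoot n p' px2 := by
        rw [hagree fuel, hroots' px2 hpx2lt, hrootpx2]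
        have e1 : (pvStep p)^[fuel] px2 = (pvStep p)^[fuel+2] x := by
          rw [Function.iterate_add_apply, ← hpx2two]
        rw [e1]
        have e2 : (pvStep p)^[fuel+2] x = pvRoot n p x := by
          rw [show fuel+2 = (fuel+1)+1 from rfl, Function.iterate_succ_apply', habs]
          exact h.2.2 x hx
        exact e2
      obtain ⟨hr, huf, hro⟩ := ih p' px2 hUF' hpx2lt habs'
      rw [hgoal]
      refine ⟨?_, huf, ?_⟩
      · rw [hr, hroots' px2 hpx2lt, hrootpx2]
      · intro y hy
        rw [hro y hy, hroots' y hy]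

theorem pvUnite_spec {n : Nat} {p : List Nat} (h : pvUF n p) {a b : Nat} (ha : a < n)
    (hb : b < n) :
    pvUF n (unite n p a b) ∧
    ∀ y, y < n → pvRoot n (unite n p a b) y =
      if pvRoot n p a ≠ pvRoot n p b ∧ pvRoot n p y = pvRoot n p b then pvRoot n p a
      else pvRoot n p y := by
  obtain ⟨h1r, h1uf, h1roots⟩ := pvFind_spec n p a h ha rfl
  obtain ⟨h2r, h2uf, h2roots⟩ := pvFind_spec n (pfind n p a).1 b h1uf hb rfl
  set r1 := pfind n p a with hr1
  set r2 := pfind n r1.1 b with hr2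
  have hra : r1.2 = pvRoot n p a := h1r
  have hrb : r2.2 = pvRoot n p b := by rw [h2r, h1roots b hb]
  have hralt : pvRoot n p a < n := pvIter_lt h ha n
  have hrblt : pvRoot n p b < n := pvIter_lt h hb n
  have hchain : ∀ y, y < n → pvRoot n r2.1 y = pvRoot n p y := by
    intro y hy; rw [h2roots y hy, h1roots y hy]
  have hgoal : unite n p a b = if r1.2 ≠ r2.2 then r2.1.set r2.2 r1.2 else r2.1 := rfl
  by_cases hne : pvRoot n p a = pvRoot n p b
  · rw [hgoal, if_neg (by rw [hra, hrb, hne]; simp)]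
    refine ⟨h2uf, fun y hy => ?_⟩
    rw [hchain y hy, if_neg (by simp [hne])]
  · have hfixa : pvStep r2.1 (pvRoot n p a) = pvRoot n p a := by
      have := h2uf.2.2 a ha
      rw [hchain a ha] at this
      exact this
    have hfixb : pvStep r2.1 (pvRoot n p b) = pvRoot n p b := by
      have := h2uf.2.2 b hb
      rw [hchain b hb] at this
      exact this
    have hfixa' : pvStep r2.1 r1.2 = r1.2 := by rw [hra]; exact hfixa
    have hfixb' : pvStep r2.1 r2.2 = r2.2 := by rw [hrb]; exact hfixb
    obtain ⟨huf', hroots'⟩ := pvUnion h2uf (ra := pvRoot n p a) (rb := pvRoot n p b)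
      hralt hrblt hfixa hfixb hne
    rw [hgoal, if_pos (by rw [hra, hrb]; exact hne), hra, hrb]
    refine ⟨huf', fun y hy => ?_⟩
    rw [hroots' y hy, hchain y hy]
    by_cases hcase : pvRoot n p y = pvRoot n p b
    · rw [if_pos hcase, if_pos ⟨hne, hcase⟩]
    · rw [if_neg hcase, if_neg (by simp [hcase])]

-- ---- the cluster list as a partition ----

def pvInCl (cs : List (List Nat)) (x y : Nat) : Prop := ∃ c ∈ cs, x ∈ c ∧ y ∈ c

def pvPart (n : Nat) (cs : List (List Nat)) : Prop :=
  (∀ c ∈ cs, c ≠ [] ∧ List.Pairwise (· < ·) c ∧ ∀ x ∈ c, x < n) ∧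
  List.Pairwise (fun c d : List Nat => ∀ x ∈ c, x ∉ d) cs ∧
  (∀ x, x < n → ∃ c ∈ cs, x ∈ c) ∧
  List.Pairwise (fun c d : List Nat => c.headD 0 < d.headD 0) cs

-- roots agree exactly on cluster mates
def pvCorr (n : Nat) (p : List Nat) (cs : List (List Nat)) : Prop :=
  ∀ x, x < n → ∀ y, y < n → (pvRoot n p x = pvRoot n p y ↔ pvInCl cs x y)

def pvJ (n : Nat) (p : List Nat) (cs : List (List Nat)) : Prop :=
  pvUF n p ∧ pvPart n cs ∧ pvCorr n p cs

theorem pvPart_unique {n : Nat} {cs : List (List Nat)} (h : pvPart n cs) :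
    ∀ c ∈ cs, ∀ d ∈ cs, ∀ x, x ∈ c → x ∈ d → c = d := by
  intro c hc d hd x hxc hxd
  by_contra hne
  have hsym : Symmetric (fun c d : List Nat => ∀ x ∈ c, x ∉ d) := by
    intro c d hR y hyd hyc
    exact hR y hyc hyd
  exact (List.Pairwise.forall hsym h.2.1) hc hd hne x hxc hxd

theorem pvFindC {n : Nat} {cs : List (List Nat)} (h : pvPart n cs) {x : Nat} (hx : x < n) :
    ∃ c, cs.find? (fun c => c.contains x) = some c ∧ c ∈ cs ∧ x ∈ c := by
  obtain ⟨c, hc, hxc⟩ := h.2.2.1 x hx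
  have hsome : (cs.find? (fun c => c.contains x)).isSome := by
    rw [List.find?_isSome]
    exact ⟨c, hc, by simpa using hxc⟩
  obtain ⟨c', hc'⟩ := Option.isSome_iff_exists.mp hsome
  refine ⟨c', hc', List.mem_of_find?_eq_some hc', ?_⟩
  have := List.find?_some hc'
  simpa using this

theorem pvHead_mem {c : List Nat} (h : c ≠ []) : c.headD 0 ∈ c := by
  cases c with
  | nil => exact absurd rfl h
  | cons a t => simp

theorem pvHead_min {c : List Nat} (hs : List.Pairwise (· < ·) c) {x : Nat} (hx : x ∈ c) :
    c.headD 0 ≤ x := by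
  cases c with
  | nil => simp at hx
  | cons a t =>
    rcases List.mem_cons.mp hx with rfl | hxt
    · simp
    · simpa using Nat.le_of_lt ((List.pairwise_cons.mp hs).1 x hxt)

-- the merge step of B preserves the partition shape
theorem pvMerge_part {n : Nat} {cs : List (List Nat)} (h : pvPart n cs) {ci cj : List Nat}
    (hci : ci ∈ cs) (hcj : cj ∈ cs) (hne : ci ≠ cj) :
    pvPart n (PySem.List.sorted
      ((cs.filter (fun c => c ≠ ci && c ≠ cj)) ++
        [PySem.List.sorted (ci ++ cj) (fun x => x) false]) (fun c => c.headD 0) false) ∧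
    ∀ x y : Nat, pvInCl (PySem.List.sorted
      ((cs.filter (fun c => c ≠ ci && c ≠ cj)) ++
        [PySem.List.sorted (ci ++ cj) (fun x => x) false]) (fun c => c.headD 0) false) x y ↔
      ((∃ c ∈ cs, c ≠ ci ∧ c ≠ cj ∧ x ∈ c ∧ y ∈ c) ∨
        ((x ∈ ci ∨ x ∈ cj) ∧ (y ∈ ci ∨ y ∈ cj))) := by
  have hcl := h.1
  have hdisj := h.2.1
  have hcov := h.2.2.1
  have hheads := h.2.2.2
  set ms := PySem.List.sorted (ci ++ cj) (fun x => x) false with hms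
  set kept := cs.filter (fun c => c ≠ ci && c ≠ cj) with hkept
  set cs' := PySem.List.sorted (kept ++ [ms]) (fun c => c.headD 0) false with hcs'
  have hperm_ms : ms.Perm (ci ++ cj) := PySem.List.sorted_perm _ _ _
  have hmem_ms : ∀ x, x ∈ ms ↔ x ∈ ci ∨ x ∈ cj := by
    intro x; rw [hms, PySem.List.mem_sorted, List.mem_append]
  have hdisj' : ∀ c ∈ cs, ∀ d ∈ cs, c ≠ d → ∀ x ∈ c, x ∉ d := by
    intro c hc d hd hne'
    exact (List.Pairwise.forall (by intro a b hR y hyb hya; exact hR y hya hyb) hdisj) hc hd hne'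
  have hcicj_disj : ∀ x ∈ ci, x ∉ cj := hdisj' ci hci cj hcj hne
  have hnodup_c : ∀ c ∈ cs, c.Nodup := fun c hc =>
    List.Pairwise.imp (fun hlt => Nat.ne_of_lt hlt) (hcl c hc).2.1
  have hnodup_ms : ms.Nodup := by
    rw [hperm_ms.nodup_iff]
    exact List.Nodup.append (hnodup_c ci hci) (hnodup_c cj hcj)
      (fun x hx hx' => hcicj_disj x hx hx')
  have hms_ne : ms ≠ [] := by
    rw [hms, Ne, PySem.List.sorted_eq_nil_iff]
    intro hnil
    exact (hcl ci hci).1 (List.append_eq_nil_iff.mp hnil).1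
  have hms_sorted : List.Pairwise (· < ·) ms := by
    have hle : List.Pairwise (fun a b : Nat => a ≤ b) ms :=
      PySem.List.sorted_pairwise (xs := ci ++ cj) (key := fun x : Nat => x)
    exact (hle.and hnodup_ms).imp (by intro a b hab; exact lt_of_le_of_ne hab.1 hab.2)
  have hms_mem_lt : ∀ x ∈ ms, x < n := by
    intro x hx
    rcases (hmem_ms x).mp hx with h1 | h1
    · exact (hcl ci hci).2.2 x h1
    · exact (hcl cj hcj).2.2 x h1
  have hmem_cs' : ∀ c, c ∈ cs' ↔ (c ∈ kept ∨ c = ms) := by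
    intro c; rw [hcs', PySem.List.mem_sorted, List.mem_append, List.mem_singleton]
  have hkept_mem : ∀ c, c ∈ kept ↔ (c ∈ cs ∧ c ≠ ci ∧ c ≠ cj) := by
    intro c
    rw [hkept, List.mem_filter]
    simp
  have hperm_cs' : cs'.Perm (kept ++ [ms]) := PySem.List.sorted_perm _ _ _
  have hkept_pw : ∀ {R : List Nat → List Nat → Prop},
      List.Pairwise R cs → List.Pairwise R kept :=
    fun hp => List.Pairwise.sublist (hkept ▸ List.filter_sublist) hp
  have hhead_ne_ms : ∀ c ∈ kept, c.headD 0 ≠ ms.headD 0 := by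
    intro c hc heq
    have hcmem := (hkept_mem c).mp hc
    have hhc : c.headD 0 ∈ c := pvHead_mem (hcl c hcmem.1).1
    have hhm : ms.headD 0 ∈ ms := pvHead_mem hms_ne
    rw [heq] at hhc
    rcases (hmem_ms _).mp hhm with h1 | h1
    · exact hcmem.2.1 (pvPart_unique h c hcmem.1 ci hci _ hhc h1)
    · exact hcmem.2.2 (pvPart_unique h c hcmem.1 cj hcj _ hhc h1)
  have hpw_ne : List.Pairwise (fun c d : List Nat => c.headD 0 ≠ d.headD 0) (kept ++ [ms]) := by
    rw [List.pairwise_append]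
    refine ⟨hkept_pw (hheads.imp (fun hlt => Nat.ne_of_lt hlt)), List.pairwise_singleton _ _, ?_⟩
    intro c hc d hd
    rw [List.mem_singleton] at hd; subst hd
    exact hhead_ne_ms c hc
  have hcs'_ne : List.Pairwise (fun c d : List Nat => c.headD 0 ≠ d.headD 0) cs' :=
    (List.Perm.pairwise_iff (fun hcd => Ne.symm hcd) hperm_cs').mpr hpw_ne
  have hcs'_le : List.Pairwise (fun c d : List Nat => c.headD 0 ≤ d.headD 0) cs' :=
    PySem.List.sorted_pairwise (xs := kept ++ [ms]) (key := fun c : List Nat => c.headD 0)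
  have hcs'_heads : List.Pairwise (fun c d : List Nat => c.headD 0 < d.headD 0) cs' :=
    (hcs'_le.and hcs'_ne).imp (by intro a b hab; exact lt_of_le_of_ne hab.1 hab.2)
  have hpw_disj : List.Pairwise (fun c d : List Nat => ∀ x ∈ c, x ∉ d) (kept ++ [ms]) := by
    rw [List.pairwise_append]
    refine ⟨hkept_pw hdisj, List.pairwise_singleton _ _, ?_⟩
    intro c hc d hd
    rw [List.mem_singleton] at hd; subst hd
    intro x hxc hxm
    have hcmem := (hkept_mem c).mp hc
    rcases (hmem_ms x).mp hxm with h1 | h1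
    · exact hcmem.2.1 (pvPart_unique h c hcmem.1 ci hci x hxc h1)
    · exact hcmem.2.2 (pvPart_unique h c hcmem.1 cj hcj x hxc h1)
  have hcs'_disj := (List.Perm.pairwise_iff
    (fun hR y hyd hyc => hR y hyc hyd) hperm_cs').mpr hpw_disj
  have hPart' : pvPart n cs' := by
    refine ⟨?_, hcs'_disj, ?_, hcs'_heads⟩
    · intro c hc
      rcases (hmem_cs' c).mp hc with hk | rfl
      · exact hcl c ((hkept_mem c).mp hk).1
      · exact ⟨hms_ne, hms_sorted, hms_mem_lt⟩
    · intro x hx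
      obtain ⟨c, hc, hxc⟩ := hcov x hx
      by_cases hcc : c = ci ∨ c = cj
      · refine ⟨ms, (hmem_cs' ms).mpr (Or.inr rfl), ?_⟩
        rcases hcc with rfl | rfl
        · exact (hmem_ms x).mpr (Or.inl hxc)
        · exact (hmem_ms x).mpr (Or.inr hxc)
      · push Not at hcc
        exact ⟨c, (hmem_cs' c).mpr (Or.inl ((hkept_mem c).mpr ⟨hc, hcc.1, hcc.2⟩)), hxc⟩
  refine ⟨hPart', ?_⟩
  intro x y
  constructor
  · rintro ⟨c, hc, hxc, hyc⟩
    rcases (hmem_cs' c).mp hc with hk | rfl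
    · obtain ⟨hcsm, hne1, hne2⟩ := (hkept_mem c).mp hk
      exact Or.inl ⟨c, hcsm, hne1, hne2, hxc, hyc⟩
    · exact Or.inr ⟨(hmem_ms x).mp hxc, (hmem_ms y).mp hyc⟩
  · rintro (⟨c, hcsm, hne1, hne2, hxc, hyc⟩ | ⟨hx, hy⟩)
    · exact ⟨c, (hmem_cs' c).mpr (Or.inl ((hkept_mem c).mpr ⟨hcsm, hne1, hne2⟩)), hxc, hyc⟩
    · exact ⟨ms, (hmem_cs' ms).mpr (Or.inr rfl), (hmem_ms x).mpr hx, (hmem_ms y).mpr hy⟩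

-- one edge (i, j) processed by both sides keeps the joint invariant
theorem pvEdge {bboxes : List (Int × Int × Int × Int)} {p : List Nat}
    {cs : List (List Nat)} (h : pvJ bboxes.length p cs) {i j : Nat}
    (hi : i < bboxes.length) (hj : j < bboxes.length) :
    pvJ bboxes.length
      (if overlapB (nthBox bboxes i) (nthBox bboxes j) then unite bboxes.length p i j else p)
      (if overlapB (nthBox bboxes i) (nthBox bboxes j) then
        match cs.find? (fun c => c.contains i), cs.find? (fun c => c.contains j) with
        | some ci, some cj =>
          if ci ≠ cj then
            PySem.List.sorted
              ((cs.filter (fun c => c ≠ ci && c ≠ cj)) ++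
                [PySem.List.sorted (ci ++ cj) (fun x => x) false])
              (fun c => c.headD 0) false
          else cs
        | _, _ => cs
      else cs) := by
  obtain ⟨hUF, hPart, hCorr⟩ := h
  by_cases hov : overlapB (nthBox bboxes i) (nthBox bboxes j) = true
  · rw [if_pos hov, if_pos hov]
    obtain ⟨ci, hfi, hcimem, hici⟩ := pvFindC hPart hi
    obtain ⟨cj, hfj, hcjmem, hjcj⟩ := pvFindC hPart hj
    rw [hfi, hfj]
    show pvJ bboxes.length (unite bboxes.length p i j)
      (if ci ≠ cj then
        PySem.List.sorted
          ((cs.filter (fun c => c ≠ ci && c ≠ cj)) ++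
            [PySem.List.sorted (ci ++ cj) (fun x => x) false])
          (fun c => c.headD 0) false
      else cs)
    obtain ⟨hufu, hrootsu⟩ := pvUnite_spec hUF hi hj
    by_cases hcc : ci = cj
    · rw [if_neg (by simp [hcc])]
      have hrij : pvRoot bboxes.length p i = pvRoot bboxes.length p j :=
        (hCorr i hi j hj).mpr ⟨ci, hcimem, hici, hcc ▸ hjcj⟩
      refine ⟨hufu, hPart, ?_⟩
      intro x hx y hy
      rw [hrootsu x hx, hrootsu y hy, if_neg (by simp [hrij]), if_neg (by simp [hrij])]
      exact hCorr x hx y hy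
    · rw [if_pos hcc]
      have hnij : ¬ pvInCl cs i j := by
        rintro ⟨c, hc, hic, hjc⟩
        exact hcc ((pvPart_unique hPart ci hcimem c hc i hici hic).trans
          (pvPart_unique hPart cj hcjmem c hc j hjcj hjc).symm)
      have hrij : pvRoot bboxes.length p i ≠ pvRoot bboxes.length p j :=
        fun he => hnij ((hCorr i hi j hj).mp he)
      obtain ⟨hPart', hInCl'⟩ := pvMerge_part hPart hcimem hcjmem hcc
      have hchari : ∀ x, x < bboxes.length →
          (x ∈ ci ↔ pvRoot bboxes.length p x = pvRoot bboxes.length p i) := by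
        intro x hx
        constructor
        · intro hxci; exact (hCorr x hx i hi).mpr ⟨ci, hcimem, hxci, hici⟩
        · intro hr
          obtain ⟨c, hc, hxc, hic⟩ := (hCorr x hx i hi).mp hr
          rw [pvPart_unique hPart c hc ci hcimem i hic hici] at hxc
          exact hxc
      have hcharj : ∀ x, x < bboxes.length →
          (x ∈ cj ↔ pvRoot bboxes.length p x = pvRoot bboxes.length p j) := by
        intro x hx
        constructor
        · intro hxcj; exact (hCorr x hx j hj).mpr ⟨cj, hcjmem, hxcj, hjcj⟩
        · intro hr
          obtain ⟨c, hc, hxc, hjc⟩ := (hCorr x hx j hj).mp hr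
          rw [pvPart_unique hPart c hc cj hcjmem j hjc hjcj] at hxc
          exact hxc
      have hsimp : ∀ z, z < bboxes.length →
          pvRoot bboxes.length (unite bboxes.length p i j) z =
            if pvRoot bboxes.length p z = pvRoot bboxes.length p j
            then pvRoot bboxes.length p i else pvRoot bboxes.length p z := by
        intro z hz
        rw [hrootsu z hz]
        by_cases hc : pvRoot bboxes.length p z = pvRoot bboxes.length p j
        · rw [if_pos ⟨hrij, hc⟩, if_pos hc]
        · rw [if_neg (by simp [hc]), if_neg hc]
      refine ⟨hufu, hPart', ?_⟩
      intro x hx y hy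
      rw [hsimp x hx, hsimp y hy, hInCl' x y]
      by_cases hxj : pvRoot bboxes.length p x = pvRoot bboxes.length p j
      · by_cases hyj : pvRoot bboxes.length p y = pvRoot bboxes.length p j
        · rw [if_pos hxj, if_pos hyj]
          constructor
          · intro _
            exact Or.inr ⟨Or.inr ((hcharj x hx).mpr hxj), Or.inr ((hcharj y hy).mpr hyj)⟩
          · intro _; rfl
        · rw [if_pos hxj, if_neg hyj]
          constructor
          · intro he
            exact Or.inr ⟨Or.inr ((hcharj x hx).mpr hxj), Or.inl ((hchari y hy).mpr he.symm)⟩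
          · rintro (⟨c, hc, hne1, hne2, hxc, hyc⟩ | ⟨hxm, hym⟩)
            · exact absurd (pvPart_unique hPart c hc cj hcjmem x hxc
                ((hcharj x hx).mpr hxj)) hne2
            · rcases hym with hy1 | hy1
              · exact ((hchari y hy).mp hy1).symm
              · exact absurd ((hcharj y hy).mp hy1) hyj
      · by_cases hyj : pvRoot bboxes.length p y = pvRoot bboxes.length p j
        · rw [if_neg hxj, if_pos hyj]
          constructor
          · intro he
            exact Or.inr ⟨Or.inl ((hchari x hx).mpr he), Or.inr ((hcharj y hy).mpr hyj)⟩
          · rintro (⟨c, hc, hne1, hne2, hxc, hyc⟩ | ⟨hxm, hym⟩)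
            · exact absurd (pvPart_unique hPart c hc cj hcjmem y hyc
                ((hcharj y hy).mpr hyj)) hne2
            · rcases hxm with hx1 | hx1
              · exact (hchari x hx).mp hx1
              · exact absurd ((hcharj x hx).mp hx1) hxj
        · rw [if_neg hxj, if_neg hyj]
          constructor
          · intro he
            obtain ⟨c, hc, hxc, hyc⟩ := (hCorr x hx y hy).mp he
            by_cases hc1 : c = ci
            · subst hc1; exact Or.inr ⟨Or.inl hxc, Or.inl hyc⟩
            by_cases hc2 : c = cj
            · subst hc2; exact Or.inr ⟨Or.inr hxc, Or.inr hyc⟩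
            · exact Or.inl ⟨c, hc, hc1, hc2, hxc, hyc⟩
          · rintro (⟨c, hc, hne1, hne2, hxc, hyc⟩ | ⟨hxm, hym⟩)
            · exact (hCorr x hx y hy).mpr ⟨c, hc, hxc, hyc⟩
            · have hxri : pvRoot bboxes.length p x = pvRoot bboxes.length p i := by
                rcases hxm with h1 | h1
                · exact (hchari x hx).mp h1
                · exact absurd ((hcharj x hx).mp h1) hxj
              have hyri : pvRoot bboxes.length p y = pvRoot bboxes.length p i := by
                rcases hym with h1 | h1
                · exact (hchari y hy).mp h1
                · exact absurd ((hcharj y hy).mp h1) hyj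
              rw [hxri, hyri]
  · rw [if_neg hov, if_neg hov]
    exact ⟨hUF, hPart, hCorr⟩


-- two folds over the same list, related stepwise, stay related
theorem pvFoldl_rel {α β γ : Type} (R : α → β → Prop) (l : List γ) (f : α → γ → α)
    (g : β → γ → β) (h : ∀ a b c, c ∈ l → R a b → R (f a c) (g b c)) :
    ∀ a b, R a b → R (l.foldl f a) (l.foldl g b) := by
  induction l with
  | nil => intro a b hab; exact hab
  | cons c t ih =>
    intro a b hab
    simp only [List.foldl_cons]
    exact ih (fun a b d hd hab => h a b d (List.mem_cons_of_mem c hd) hab) _ _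
      (h a b c (List.mem_cons_self) hab)


theorem pvInit_J (n : Nat) : pvJ n (List.range n) ((List.range n).map (fun i => [i])) := by
  have hstep : ∀ x, x < n → pvStep (List.range n) x = x := by
    intro x hx
    simp [pvStep, List.getD, hx]
  have hroot : ∀ x, x < n → pvRoot n (List.range n) x = x := by
    intro x hx
    exact Function.iterate_fixed (hstep x hx) n
  refine ⟨⟨List.length_range, ?_, ?_⟩, ⟨?_, ?_, ?_, ?_⟩, ?_⟩
  · intro x hx; rw [hstep x hx]; exact hx
  · intro x hx; rw [hroot x hx, hstep x hx]
  · intro c hc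
    obtain ⟨i, hi, rfl⟩ := List.mem_map.mp hc
    exact ⟨by simp, by simp, by simpa using List.mem_range.mp hi⟩
  · rw [List.pairwise_map]
    exact (List.pairwise_lt_range).imp (by intro i j hij x hx hx'; simp at hx hx'; omega)
  · intro x hx
    exact ⟨[x], List.mem_map.mpr ⟨x, List.mem_range.mpr hx, rfl⟩, by simp⟩
  · rw [List.pairwise_map]
    simpa using List.pairwise_lt_range
  · intro x hx y hy
    rw [hroot x hx, hroot y hy]
    constructor
    · intro hxy
      exact ⟨[x], List.mem_map.mpr ⟨x, List.mem_range.mpr hx, rfl⟩, by simp, by simp [hxy]⟩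
    · rintro ⟨c, hc, hxc, hyc⟩
      obtain ⟨i, _, rfl⟩ := List.mem_map.mp hc
      simp at hxc hyc
      omega


-- the double pair loop keeps the joint invariant
theorem pvLoop_J (bboxes : List (Int × Int × Int × Int)) :
    pvJ bboxes.length
      ((List.range bboxes.length).foldl (fun par i =>
        let bi := nthBox bboxes i
        (List.range' (i + 1) (bboxes.length - (i + 1))).foldl (fun par j =>
          if overlapB bi (nthBox bboxes j) then unite bboxes.length par i j else par) par)
        (List.range bboxes.length))
      ((List.range bboxes.length).foldl (fun cs i =>
        let bi := nthBox bboxes i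
        (List.range' (i + 1) (bboxes.length - (i + 1))).foldl (fun cs j =>
          if overlapB bi (nthBox bboxes j) then
            match cs.find? (fun c => c.contains i), cs.find? (fun c => c.contains j) with
            | some ci, some cj =>
              if ci ≠ cj then
                PySem.List.sorted
                  ((cs.filter (fun c => c ≠ ci && c ≠ cj)) ++
                    [PySem.List.sorted (ci ++ cj) (fun x => x) false])
                  (fun c => c.headD 0) false
              else cs
            | _, _ => cs
          else cs) cs)
        ((List.range bboxes.length).map (fun i => [i]))) := by
  apply pvFoldl_rel (pvJ bboxes.length) (List.range bboxes.length) _ _ ?_ _ _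
    (pvInit_J bboxes.length)
  intro p cs i hi hJ
  have hi' : i < bboxes.length := List.mem_range.mp hi
  apply pvFoldl_rel (pvJ bboxes.length) _ _ _ ?_ _ _ hJ
  intro p' cs' j hj hJ'
  have hj' : j < bboxes.length := by
    have := List.mem_range'_1.mp hj
    omega
  exact pvEdge hJ' hi' hj'


-- setdefault-append when some entry has the key (entries keyed injectively)
theorem pvSdapp_map {K : List Nat → Nat} {V : List Nat → List Nat} {r k : Nat} {c0 : List Nat} :
    ∀ (l : List (List Nat)), l.Nodup → (∀ d ∈ l, (K d = r ↔ d = c0)) → c0 ∈ l →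
    sdapp (l.map (fun c => (K c, V c))) r k =
      l.map (fun c => (K c, if c = c0 then V c ++ [k] else V c)) := by
  intro l
  induction l with
  | nil => intro _ _ h; simp at h
  | cons d t ih =>
    intro hnd hiff hc0
    by_cases hd : d = c0
    · subst hd
      simp only [List.map_cons, sdapp]
      rw [if_pos ((hiff d (by simp)).mpr rfl)]
      simp only [if_true]
      congr 1
      apply List.map_congr_left
      intro c hc
      rw [if_neg (by intro hcd; subst hcd; exact (List.nodup_cons.mp hnd).1 hc)]
    · have hKd : K d ≠ r := fun hk => hd ((hiff d (by simp)).mp hk)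
      have hc0t : c0 ∈ t := by
        rcases List.mem_cons.mp hc0 with h1 | h1
        · exact absurd h1.symm hd
        · exact h1
      simp only [List.map_cons, sdapp]
      rw [if_neg hKd, if_neg hd]
      exact congrArg (List.cons _)
        (ih (List.nodup_cons.mp hnd).2 (fun d' hd' => hiff d' (by simp [hd'])) hc0t)

-- setdefault-append when no entry has the key
theorem pvSdapp_absent {r k : Nat} : ∀ (gs : List (Nat × List Nat)),
    (∀ e ∈ gs, e.1 ≠ r) → sdapp gs r k = gs ++ [(r, [k])] := by
  intro gs
  induction gs with
  | nil => intro _; rfl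
  | cons e t ih =>
    intro hne
    cases e with
    | mk a b =>
      simp only [sdapp]
      rw [if_neg (hne (a, b) (by simp))]
      rw [ih (fun e he => hne e (by simp [he]))]
      simp

theorem pvFilter_lt_succ_mem {c : List Nat} {k : Nat} (hs : List.Pairwise (· < ·) c)
    (hk : k ∈ c) :
    c.filter (fun x => decide (x < k+1)) = c.filter (fun x => decide (x < k)) ++ [k] := by
  induction c with
  | nil => simp at hk
  | cons a t ih =>
    have hpw := List.pairwise_cons.mp hs
    rcases List.mem_cons.mp hk with rfl | hkt
    · have ht1 : t.filter (fun x => decide (x < k+1)) = [] := by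
        apply List.filter_eq_nil_iff.mpr
        intro x hx
        have hx' := hpw.1 x hx
        simp only [decide_eq_true_eq]
        omega
      have ht2 : t.filter (fun x => decide (x < k)) = [] := by
        apply List.filter_eq_nil_iff.mpr
        intro x hx
        have hx' := hpw.1 x hx
        simp only [decide_eq_true_eq]
        omega
      rw [List.filter_cons, List.filter_cons, if_pos (by simp), if_neg (by simp),
        ht1, ht2]
      simp
    · have hak : a < k := hpw.1 k hkt
      rw [List.filter_cons, List.filter_cons, if_pos (by simp only [decide_eq_true_eq]; omega),
        if_pos (by simp only [decide_eq_true_eq]; omega), ih hpw.2 hkt]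
      simp

theorem pvFilter_lt_succ_notmem {c : List Nat} {k : Nat} (hk : k ∉ c) :
    c.filter (fun x => decide (x < k+1)) = c.filter (fun x => decide (x < k)) := by
  apply List.filter_congr
  intro x hx
  have hxk : x ≠ k := fun h => hk (h ▸ hx)
  exact decide_eq_decide.mpr (by omega)

theorem pvFilter_head_split {cs : List (List Nat)} {c0 : List Nat} {k : Nat}
    (hpw : List.Pairwise (fun c d : List Nat => c.headD 0 < d.headD 0) cs)
    (hc0 : c0 ∈ cs) (hh : c0.headD 0 = k) :
    cs.filter (fun c => decide (c.headD 0 < k+1))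
      = cs.filter (fun c => decide (c.headD 0 < k)) ++ [c0] := by
  induction cs with
  | nil => simp at hc0
  | cons d t ih =>
    have hp := List.pairwise_cons.mp hpw
    rcases List.mem_cons.mp hc0 with rfl | hc0t
    · have ht1 : t.filter (fun c : List Nat => decide (c.headD 0 < k+1)) = [] := by
        apply List.filter_eq_nil_iff.mpr
        intro c hc
        have hc' := hp.1 c hc
        simp only [decide_eq_true_eq]
        omega
      have ht2 : t.filter (fun c : List Nat => decide (c.headD 0 < k)) = [] := by
        apply List.filter_eq_nil_iff.mpr
        intro c hc
        have hc' := hp.1 c hc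
        simp only [decide_eq_true_eq]
        omega
      rw [List.filter_cons, List.filter_cons,
        if_pos (by simp only [decide_eq_true_eq]; omega),
        if_neg (by simp only [decide_eq_true_eq]; omega), ht1, ht2]
      simp
    · have hdk : d.headD 0 < k := hh ▸ hp.1 c0 hc0t
      rw [List.filter_cons, List.filter_cons,
        if_pos (by simp only [decide_eq_true_eq]; omega),
        if_pos (by simp only [decide_eq_true_eq]; omega), ih hp.2 hc0t]
      simp

theorem pvFilter_head_self {c : List Nat} {k : Nat} (hs : List.Pairwise (· < ·) c)
    (hne : c ≠ []) (hh : c.headD 0 = k) :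
    c.filter (fun x => decide (x < k+1)) = [k] := by
  cases c with
  | nil => exact absurd rfl hne
  | cons a t =>
    have ha : a = k := by simpa using hh
    subst ha
    have ht : t.filter (fun x => decide (x < a+1)) = [] := by
      apply List.filter_eq_nil_iff.mpr
      intro x hx
      have hx' := (List.pairwise_cons.mp hs).1 x hx
      simp only [decide_eq_true_eq]
      omega
    rw [List.filter_cons, if_pos (by simp), ht]

-- the grouping pass of A reads exactly the cluster list back off the parent array
theorem pvPhase2 {n : Nat} {p : List Nat} {cs : List (List Nat)} (h : pvJ n p cs) :
    (((List.range n).foldl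
      (fun (st : List (Nat × List Nat) × List Nat) i =>
        let fr := pfind n st.2 i
        (sdapp st.1 fr.2 i, fr.1)) ([], p)).1.map (fun kv => kv.2)) = cs := by
  obtain ⟨hUF, hPart, hCorr⟩ := h
  have hclnn : ∀ c ∈ cs, c ≠ [] := fun c hc => (hPart.1 c hc).1
  have hsorted : ∀ c ∈ cs, List.Pairwise (· < ·) c := fun c hc => (hPart.1 c hc).2.1
  have hmemlt : ∀ c ∈ cs, ∀ x ∈ c, x < n := fun c hc => (hPart.1 c hc).2.2
  have hheadlt : ∀ c ∈ cs, c.headD 0 < n :=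
    fun c hc => hmemlt c hc _ (pvHead_mem (hclnn c hc))
  have hnodcs : cs.Nodup :=
    List.Pairwise.imp (fun hlt he => by subst he; exact lt_irrefl _ hlt) hPart.2.2.2
  have hkey : ∀ k, k < n → ∀ c ∈ cs, (pvRoot n p (c.headD 0) = pvRoot n p k ↔ k ∈ c) := by
    intro k hk c hc
    have hhd := pvHead_mem (hclnn c hc)
    have hhdlt := hmemlt c hc _ hhd
    constructor
    · intro hr
      obtain ⟨d, hd, h1, h2⟩ := (hCorr _ hhdlt k hk).mp hr
      rw [← pvPart_unique hPart d hd c hc _ h1 hhd]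
      exact h2
    · intro hkc
      exact (hCorr _ hhdlt k hk).mpr ⟨c, hc, hhd, hkc⟩
  set F : List (Nat × List Nat) × List Nat → Nat → List (Nat × List Nat) × List Nat :=
    fun st i =>
      let fr := pfind n st.2 i
      (sdapp st.1 fr.2 i, fr.1) with hF
  have hmain : ∀ k, k ≤ n →
      ((List.range k).foldl F ([], p)).1
        = (cs.filter (fun c => decide (c.headD 0 < k))).map
            (fun c => (pvRoot n p (c.headD 0), c.filter (fun x => decide (x < k)))) ∧
      pvUF n ((List.range k).foldl F ([], p)).2 ∧
      ∀ y, y < n → pvRoot n ((List.range k).foldl F ([], p)).2 y = pvRoot n p y := by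
    intro k
    induction k with
    | zero =>
      intro _
      refine ⟨?_, hUF, fun y _ => rfl⟩
      have h0 : cs.filter (fun c => decide (c.headD 0 < 0)) = [] :=
        List.filter_eq_nil_iff.mpr (by intro c hc; simp)
      rw [h0]
      rfl
    | succ k ih =>
      intro hk1
      obtain ⟨hgs, hufk, hrootsk⟩ := ih (by omega)
      have hkn : k < n := by omega
      rw [List.range_succ, List.foldl_append, List.foldl_cons, List.foldl_nil]
      set ST := (List.range k).foldl F ([], p) with hST
      have hFst : F ST k = (sdapp ST.1 (pfind n ST.2 k).2 k, (pfind n ST.2 k).1) := rfl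
      rw [hFst]
      obtain ⟨hfr2, hfruf, hfroots⟩ := pvFind_spec n ST.2 k hufk hkn rfl
      have hr : (pfind n ST.2 k).2 = pvRoot n p k := by rw [hfr2, hrootsk k hkn]
      refine ⟨?_, hfruf, fun y hy => by rw [hfroots y hy, hrootsk y hy]⟩
      show sdapp ST.1 (pfind n ST.2 k).2 k = _
      obtain ⟨c0, hc0, hkc0⟩ := hPart.2.2.1 k hkn
      have hkuniq : ∀ c ∈ cs, (k ∈ c ↔ c = c0) := by
        intro c hc
        constructor
        · intro hkc; exact pvPart_unique hPart c hc c0 hc0 k hkc hkc0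
        · intro he; rw [he]; exact hkc0
      set l := cs.filter (fun c => decide (c.headD 0 < k)) with hl
      have hlsub : ∀ c ∈ l, c ∈ cs := fun c hc => (List.mem_filter.mp hc).1
      have hlkey : ∀ c ∈ l, (pvRoot n p (c.headD 0) = pvRoot n p k ↔ c = c0) := by
        intro c hc
        rw [hkey k hkn c (hlsub c hc)]
        exact hkuniq c (hlsub c hc)
      have hlnodup : l.Nodup := hnodcs.filter _
      rw [hgs, hr]
      by_cases hhd : c0.headD 0 < k
      · have hc0l : c0 ∈ l := List.mem_filter.mpr ⟨hc0, by simpa using hhd⟩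
        rw [pvSdapp_map l hlnodup hlkey hc0l]
        have hfilts : cs.filter (fun c => decide (c.headD 0 < k+1)) = l := by
          rw [hl]
          apply List.filter_congr
          intro c hc
          apply decide_eq_decide.mpr
          have hcne : c.headD 0 ≠ k := by
            intro he
            have hkc : k ∈ c := he ▸ pvHead_mem (hclnn c hc)
            have hcc0 : c = c0 := (hkuniq c hc).mp hkc
            rw [hcc0] at he
            omega
          omega
        rw [hfilts]
        apply List.map_congr_left
        intro c hc
        by_cases hcc : c = c0
        · subst hcc
          rw [if_pos rfl, pvFilter_lt_succ_mem (hsorted c (hlsub c hc)) hkc0]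
        · rw [if_neg hcc,
            pvFilter_lt_succ_notmem (fun hkc => hcc ((hkuniq c (hlsub c hc)).mp hkc))]
      · have hhdle : c0.headD 0 ≤ k := pvHead_min (hsorted c0 hc0) hkc0
        have hhdk : c0.headD 0 = k := by omega
        have habsent : ∀ e ∈ l.map
            (fun c => (pvRoot n p (c.headD 0), c.filter (fun x => decide (x < k)))),
            e.1 ≠ pvRoot n p k := by
          intro e he
          obtain ⟨c, hc, rfl⟩ := List.mem_map.mp he
          intro hek
          have hcc0 : c = c0 := (hlkey c hc).mp hek
          subst hcc0
          exact hhd (by simpa using (List.mem_filter.mp hc).2)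
        rw [pvSdapp_absent _ habsent, pvFilter_head_split hPart.2.2.2 hc0 hhdk,
          List.map_append]
        congr 1
        · apply List.map_congr_left
          intro c hc
          rw [pvFilter_lt_succ_notmem (fun hkc => ?_)]
          have hcc0 : c = c0 := (hkuniq c (hlsub c hc)).mp hkc
          subst hcc0
          exact hhd (by simpa using (List.mem_filter.mp hc).2)
        · simp only [List.map_cons, List.map_nil]
          rw [pvFilter_head_self (hsorted c0 hc0) (hclnn c0 hc0) hhdk, hhdk]
  obtain ⟨hgs, _, _⟩ := hmain n le_rfl
  rw [hgs]
  have hfull : cs.filter (fun c => decide (c.headD 0 < n)) = cs :=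
    List.filter_eq_self.mpr (by intro c hc; simpa using hheadlt c hc)
  rw [hfull, List.map_map]
  have hid : ∀ c ∈ cs, ((fun kv : Nat × List Nat => kv.2) ∘
      (fun c => (pvRoot n p (c.headD 0), c.filter (fun x => decide (x < n))))) c = c := by
    intro c hc
    exact List.filter_eq_self.mpr (by intro x hx; simpa using hmemlt c hc x hx)
  rw [List.map_congr_left hid]
  simp



-- ===== VERDICT (by name: the statement is the Claim_ definition above) =====
theorem cluster_by_overlap_py_spec : Claim_equal_cluster_by_overlap_py := by
  intro bboxes _
  unfold Spec_cluster_by_overlap_py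
  by_cases hn : bboxes.length = 0
  · simp [cluster_by_overlap_py, cluster_by_overlap_py_alt, hn]
  · have hph := pvPhase2 (pvLoop_J bboxes)
    show cluster_by_overlap_py bboxes = cluster_by_overlap_py_alt bboxes
    simp only [cluster_by_overlap_py, cluster_by_overlap_py_alt]
    rw [if_neg hn, ← hph, List.map_map]
    rfl
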